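-- pv_equiv track=rewrite | github.com/chao-shi/lclc | 651_4_keys_m/main.py | maxA
-- ===== SOURCE A (Python) =====
-- def maxA(N):
--     """
--     :type N: int
--     :rtype: int
--     """
--     res = [0, 1, 2, 3]
--     for i in range(4, N+1):
--         maxv = 1 + res[-1]
--         for j in range(1, i - 2):
--             # step j ... i - 1 does A, C, P, P ....
--             maxv = max(maxv, res[j] * (i - j - 1))
--         res.append(maxv)
--     return res[N]
-- ===== SOURCE B (Python) =====
-- def maxA(N):
--     # O(N) sliding-window DP: the best paste run starts at most 6 keystrokes back,
--     # so only a constant window of break points is examined and only the last 7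
--     # dp values are kept.  For nonpositive N no key can be pressed, so 0 'A's.
--     if N <= 0:
--         return 0
--     if N < 4:
--         return N
--     win = [0, 0, 0, 0, 1, 2, 3]  # dp[i-7], ..., dp[i-1] (negative indices as 0)
--     for i in range(4, N + 1):
--         best = win[6] + 1
--         for k in range(1, 5):    # break point j = i-7+k for k = 1..4
--             j = i - 7 + k
--             if j >= 1:
--                 best = max(best, win[k] * (i - j - 1))
--         win = win[1:] + [best]
--     return win[6]
-- ===== Notes on version B (the rewrite author's own statement) =====
-- stated objective: faster
-- what changed: The inner scan over all break points j is replaced by a constant-size window (the optimal paste run starts at most 6 keystrokes back, proved via the bump j -> j+4), and only the last 7 dp values are kept in a sliding window instead of the whole table.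
-- intended difference: For N in {-3,-2,-1} A's negative indexing into the seed list accidentally returns N+4; B returns 0, the number of 'A's typeable with no keystrokes, the intended value for nonpositive N. — e.g. on maxA(-1): A returns 3, B returns 0
import Mathlib
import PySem

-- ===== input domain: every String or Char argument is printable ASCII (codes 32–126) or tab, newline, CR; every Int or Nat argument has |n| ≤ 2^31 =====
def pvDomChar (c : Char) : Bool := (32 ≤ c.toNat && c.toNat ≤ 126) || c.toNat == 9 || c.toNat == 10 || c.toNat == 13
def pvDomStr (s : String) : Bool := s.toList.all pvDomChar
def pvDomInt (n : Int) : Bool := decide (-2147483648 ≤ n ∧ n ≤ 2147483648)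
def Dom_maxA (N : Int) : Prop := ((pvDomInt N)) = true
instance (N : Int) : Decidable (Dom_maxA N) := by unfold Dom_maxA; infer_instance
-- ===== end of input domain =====

-- B replaces A's O(N^2) inner scan over all break points by a proved-exact constant window
-- (sliding window of the last 7 dp values): asymptotically faster.

-- ===== PORT A =====
-- res[j] accesses are always in range inside the loop; the final res[N] is in range exactly
-- when Pre_maxA holds, so pyGetD's default is never used on admitted inputs.
def maxA (N : Int) : Int :=
  let res : List Int := [0, 1, 2, 3]
  let res := (PySem.List.pyRange 4 (N + 1) 1).foldl
    (fun res i =>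
      let maxv := 1 + PySem.List.pyGetD res (-1) 0
      let maxv := (PySem.List.pyRange 1 (i - 2) 1).foldl
        (fun maxv j => max maxv (PySem.List.pyGetD res j 0 * (i - j - 1))) maxv
      res ++ [maxv]) res
  PySem.List.pyGetD res N 0

-- ===== PORT B =====
def maxA_alt (N : Int) : Int :=
  if N ≤ 0 then 0
  else if N < 4 then N
  else
    let win : List Int := [0, 0, 0, 0, 1, 2, 3]
    let win := (PySem.List.pyRange 4 (N + 1) 1).foldl
      (fun win i =>
        let best := PySem.List.pyGetD win 6 0 + 1
        let best := (PySem.List.pyRange 1 5 1).foldl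
          (fun best k =>
            let j := i - 7 + k
            if 1 ≤ j then max best (PySem.List.pyGetD win k 0 * (i - j - 1)) else best) best
        PySem.List.slice win (some 1) none ++ [best]) win
    PySem.List.pyGetD win 6 0

-- ===== PRECONDITION & SPEC =====
-- Pre_ excludes exactly N ≤ -5, where A raises IndexError on res[N].
def Pre_maxA (N : Int) : Prop := -4 ≤ N
instance (N : Int) : Decidable (Pre_maxA N) := by unfold Pre_maxA; infer_instance
def pvWitness_maxA : Int := 10

-- For N in {-3,-2,-1} A's negative indexing into the seed list accidentally returns N+4;
-- B returns 0, the number of 'A's typeable with no keystrokes, the intended value for nonpositive N.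
def D_maxA (N : Int) : Prop := N = -3 ∨ N = -2 ∨ N = -1
instance (N : Int) : Decidable (D_maxA N) := by unfold D_maxA; infer_instance

def Spec_maxA (N : Int) (out : Int) : Prop := ¬ D_maxA N → out = maxA_alt N
instance (N : Int) (out : Int) : Decidable (Spec_maxA N out) := by unfold Spec_maxA; infer_instance

def pvDiffWitness_maxA : Int := -1
def pvDiffWitnessOut_maxA : Int × Int := (3, 0)

-- ===== CLAIM (what is proved, stated in full; the proofs are below) =====
def Claim_unchanged_maxA : Prop := ∀ (N : Int), Dom_maxA N → Pre_maxA N → Spec_maxA N (maxA N)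
def Claim_changed_maxA : Prop := Dom_maxA (pvDiffWitness_maxA) ∧ Pre_maxA (pvDiffWitness_maxA) ∧ D_maxA (pvDiffWitness_maxA) ∧ maxA (pvDiffWitness_maxA) = pvDiffWitnessOut_maxA.1 ∧ maxA_alt (pvDiffWitness_maxA) = pvDiffWitnessOut_maxA.2 ∧ pvDiffWitnessOut_maxA.1 ≠ pvDiffWitnessOut_maxA.2
def Claim_exact_maxA : Prop := ∀ (N : Int), Dom_maxA N → Pre_maxA N → D_maxA N → maxA N ≠ maxA_alt N

-- ===== LEMMAS AND PROOFS =====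

-- Mathematical model of the dp table (A's res list).
def innerT (res : List Int) (i : Nat) : Int :=
  (List.range' 1 (i - 3)).foldl
    (fun m j => max m (res.getD j 0 * ((i : Int) - (j : Int) - 1)))
    (1 + res.getD (i - 1) 0)

def resF : Nat → List Int
  | 0 => [0, 1, 2, 3]
  | n + 1 => if n + 1 ≤ 3 then [0, 1, 2, 3] else resF n ++ [innerT (resF n) (n + 1)]

def f (n : Nat) : Int := (resF n).getD n 0

-- dp value at an Int position, 0 for negative positions (B's window padding).
def gI (z : Int) : Int := if z < 0 then 0 else f z.toNat

theorem resF_le3 (n : Nat) (h : n ≤ 3) : resF n = [0, 1, 2, 3] := by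
  interval_cases n <;> rfl

theorem resF_length (n : Nat) : (resF n).length = max 4 (n + 1) := by
  induction n with
  | zero => rfl
  | succ n ih =>
    by_cases h : n + 1 ≤ 3
    · simp [resF, h]; omega
    · simp [resF, h, ih]; omega

theorem resF_succ (n : Nat) (h : 3 ≤ n) :
    resF (n + 1) = resF n ++ [innerT (resF n) (n + 1)] := by
  have h' : ¬ (n + 1 ≤ 3) := by omega
  simp [resF, h']

theorem getD_resF (n k : Nat) (h : k ≤ n) : (resF n).getD k 0 = f k := by
  induction n with
  | zero => interval_cases k; rfl
  | succ n ih =>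
    by_cases h3 : n + 1 ≤ 3
    · rw [resF_le3 _ h3]
      unfold f
      rw [resF_le3 _ (by omega)]
    · rcases Nat.lt_or_ge k (n + 1) with hk | hk
      · rw [resF_succ n (by omega)]
        rw [List.getD_append _ _ _ _ (by rw [resF_length]; omega)]
        exact ih (by omega)
      · have : k = n + 1 := by omega
        subst this; rfl

-- generic max-fold facts
theorem base_le_foldl_max {α : Type} (L : List α) (g : α → Int) (b : Int) :
    b ≤ L.foldl (fun m x => max m (g x)) b := by
  induction L generalizing b with
  | nil => simp
  | cons x xs ih => exact le_trans (le_max_left _ _) (ih _)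

theorem mem_le_foldl_max {α : Type} {L : List α} {x : α} (g : α → Int) (hx : x ∈ L) (b : Int) :
    g x ≤ L.foldl (fun m y => max m (g y)) b := by
  induction L generalizing b with
  | nil => cases hx
  | cons y ys ih =>
    rcases List.mem_cons.mp hx with h | h
    · subst h; exact le_trans (le_max_right _ _) (base_le_foldl_max _ _ _)
    · exact ih h _

theorem foldl_max_le {α : Type} {L : List α} (g : α → Int) {b c : Int}
    (hb : b ≤ c) (h : ∀ x ∈ L, g x ≤ c) : L.foldl (fun m x => max m (g x)) b ≤ c := by
  induction L generalizing b with
  | nil => simpa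
  | cons x xs ih =>
    exact ih (max_le hb (h x (by simp))) (fun y hy => h y (by simp [hy]))

theorem foldl_congr_mem' {α β : Type} (L : List α) (g h : β → α → β) (b : β)
    (H : ∀ acc x, x ∈ L → g acc x = h acc x) : L.foldl g b = L.foldl h b := by
  induction L generalizing b with
  | nil => rfl
  | cons x xs ih =>
    rw [List.foldl_cons, List.foldl_cons, H b x (by simp)]
    exact ih _ (fun acc y hy => H acc y (by simp [hy]))

theorem f_rec (n : Nat) (h : 4 ≤ n) :
    f n = (List.range' 1 (n - 3)).foldl
      (fun m j => max m (f j * ((n : Int) - (j : Int) - 1))) (1 + f (n - 1)) := by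
  obtain ⟨m, rfl⟩ : ∃ m, n = m + 1 := ⟨n - 1, by omega⟩
  have hm : 3 ≤ m := by omega
  have hlen : (resF m).length = m + 1 := by rw [resF_length]; omega
  show (resF (m + 1)).getD (m + 1) 0 = _
  rw [resF_succ m hm, List.getD_append_right _ _ _ _ (by omega), hlen]
  simp only [Nat.sub_self, List.getD_cons_zero]
  unfold innerT
  rw [show m + 1 - 1 = m by omega, getD_resF m m le_rfl]
  apply foldl_congr_mem'
  intro acc j hj
  have hmem := List.mem_range'_1.mp hj
  rw [getD_resF m j (by omega)]

theorem f_le3 (k : Nat) (h : k ≤ 3) : f k = k := by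
  interval_cases k <;> rfl

theorem f_nonneg (n : Nat) : 0 ≤ f n := by
  induction n using Nat.strong_induction_on with
  | _ n ih =>
    by_cases h : n ≤ 3
    · rw [f_le3 n h]; positivity
    · have h4 : 4 ≤ n := by omega
      rw [f_rec n h4]
      have := ih (n - 1) (by omega)
      exact le_trans (by omega) (base_le_foldl_max _ _ _)

theorem f_ge_term (n j : Nat) (h4 : 4 ≤ n) (h1 : 1 ≤ j) (h2 : j ≤ n - 3) :
    f j * ((n : Int) - (j : Int) - 1) ≤ f n := by
  rw [f_rec n h4]
  exact mem_le_foldl_max (fun j => f j * ((n : Int) - (j : Int) - 1))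
    (List.mem_range'_1.mpr ⟨h1, by omega⟩) _

theorem f_bump (i j : Nat) (h1 : 1 ≤ j) (h2 : j + 7 ≤ i) :
    f j * ((i : Int) - (j : Int) - 1) ≤ f (j + 4) * ((i : Int) - ((j : Nat) + 4 : Nat) - 1) := by
  have h3 : f j * 3 ≤ f (j + 4) := by
    have := f_ge_term (j + 4) j (by omega) h1 (by omega)
    have e : ((j + 4 : Nat) : Int) - (j : Int) - 1 = 3 := by push_cast; ring
    rwa [e] at this
  have h0 : 0 ≤ f j := f_nonneg j
  have hd : (7 : Int) ≤ (i : Int) - (j : Int) := by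
    have : ((j : Int) + 7) ≤ (i : Int) := by exact_mod_cast Nat.cast_le.mpr h2
    omega
  push_cast
  nlinarith [mul_nonneg h0 (by linarith : (0:Int) ≤ (i : Int) - (j : Int) - 7),
             mul_nonneg (by linarith : (0:Int) ≤ f (j + 4) - f j * 3)
                        (by linarith : (0:Int) ≤ (i : Int) - (j : Int) - 5)]

-- the windowed fold (break points max 1 (i-6) .. i-3)
def wfold (i : Nat) (b : Int) : Int :=
  (List.range' (max 1 (i - 6)) (i - 2 - max 1 (i - 6))).foldl
    (fun m j => max m (f j * ((i : Int) - (j : Int) - 1))) b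

theorem term_le_wfold (i : Nat) (hi : 4 ≤ i) (b : Int) :
    ∀ k j, i - j = k → 1 ≤ j → j ≤ i - 3 →
      f j * ((i : Int) - (j : Int) - 1) ≤ wfold i b := by
  intro k
  induction k using Nat.strong_induction_on with
  | _ k ih =>
    intro j hk h1 h2
    by_cases hw : max 1 (i - 6) ≤ j
    · exact mem_le_foldl_max (fun j => f j * ((i : Int) - (j : Int) - 1))
        (List.mem_range'_1.mpr ⟨hw, by omega⟩) b
    · have hj7 : j + 7 ≤ i := by omega
      calc f j * ((i : Int) - (j : Int) - 1)
          ≤ f (j + 4) * ((i : Int) - ((j + 4 : Nat) : Int) - 1) := f_bump i j h1 hj7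
        _ ≤ wfold i b := ih (i - (j + 4)) (by omega) (j + 4) rfl (by omega) (by omega)

theorem full_eq_wfold (i : Nat) (hi : 4 ≤ i) (b : Int) :
    (List.range' 1 (i - 3)).foldl
      (fun m j => max m (f j * ((i : Int) - (j : Int) - 1))) b = wfold i b := by
  apply le_antisymm
  · apply foldl_max_le _ (base_le_foldl_max _ _ _)
    intro j hj
    have := List.mem_range'_1.mp hj
    exact term_le_wfold i hi b (i - j) j rfl (by omega) (by omega)
  · apply foldl_max_le _ (base_le_foldl_max _ _ _)
    intro j hj
    have hm := List.mem_range'_1.mp hj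
    exact mem_le_foldl_max (fun j => f j * ((i : Int) - (j : Int) - 1))
      (List.mem_range'_1.mpr ⟨by omega, by omega⟩) b


theorem gI_natCast (m : Nat) : gI (m : Int) = f m := by simp [gI]

-- ===== bridge: port A's loop = resF =====
theorem loopA (n : Nat) (h : 3 ≤ n) :
    (PySem.List.pyRange 4 ((n : Int) + 1) 1).foldl
      (fun res i =>
        let maxv := 1 + PySem.List.pyGetD res (-1) 0
        let maxv := (PySem.List.pyRange 1 (i - 2) 1).foldl
          (fun maxv j => max maxv (PySem.List.pyGetD res j 0 * (i - j - 1))) maxv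
        res ++ [maxv]) [0, 1, 2, 3]
      = resF n := by
  induction n, h using Nat.le_induction with
  | base =>
    rw [show ((3 : Nat) : Int) + 1 = 4 by norm_num, PySem.List.pyRange_one_eq_nil le_rfl]
    rw [resF_le3 3 (by omega)]
    rfl
  | succ n hn ih =>
    have hc : ((n + 1 : Nat) : Int) + 1 = ((n : Int) + 1) + 1 := by push_cast; ring
    rw [hc, PySem.List.pyRange_one_succ_right (by exact_mod_cast by omega : (4:Int) ≤ (n : Int) + 1),
        List.foldl_append, ih, List.foldl_cons, List.foldl_nil, resF_succ n hn]
    have hlen : (resF n).length = n + 1 := by rw [resF_length]; omega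
    have hne : resF n ≠ [] := by
      intro hcontra; rw [hcontra] at hlen; simp at hlen
    simp only []
    congr 1
    rw [List.cons.injEq]
    refine ⟨?_, rfl⟩
    -- inner fold = innerT (resF n) (n+1)
    unfold innerT
    have hbase : 1 + PySem.List.pyGetD (resF n) (-1) 0 = 1 + (resF n).getD (n + 1 - 1) 0 := by
      rw [PySem.List.pyGetD_neg_one _ _ hne, show n + 1 - 1 = n by omega,
          List.getLast_eq_getElem, List.getD_eq_getElem _ _ (by omega : n < (resF n).length)]
      simp only [show (resF n).length - 1 = n from by omega]
    rw [hbase]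
    have hlist : PySem.List.pyRange 1 ((n : Int) + 1 - 2) 1
        = (List.range' 1 (n + 1 - 3)).map (fun j : Nat => (j : Int)) := by
      rw [PySem.List.pyRange_one, List.range'_eq_map_range]
      rw [show ((n : Int) + 1 - 2 - 1).toNat = n + 1 - 3 by omega]
      rw [List.map_map]
      apply List.map_congr_left
      intro k _
      simp only [Function.comp_apply]
      push_cast
      ring
    rw [hlist, List.foldl_map]
    apply foldl_congr_mem'
    intro acc j hj
    have hmem := List.mem_range'_1.mp hj
    rw [PySem.List.pyGetD_natCast, show ((n : Int) + 1) = ((n + 1 : Nat) : Int) by push_cast; ring]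

theorem maxA_eq (n : Nat) (h : 4 ≤ n) : maxA ((n : Int)) = f n := by
  simp only [maxA]
  rw [loopA n (by omega), PySem.List.pyGetD_natCast]
  rfl

-- ===== bridge: port B's loop = sliding window of f =====
-- the cleaned inner step of B (same guard and terms, gI instead of window indexing)
def cleanFold (i b : Int) : Int :=
  ([1, 2, 3, 4] : List Int).foldl
    (fun best k => if 1 ≤ i - 7 + k then max best (gI (i - 7 + k) * (i - (i - 7 + k) - 1)) else best) b

theorem f_val_4 : f 4 = 4 := by decide
theorem f_val_5 : f 5 = 5 := by decide
theorem f_val_6 : f 6 = 6 := by decide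

theorem cleanFold_eq (n : Nat) (h : 3 ≤ n) :
    cleanFold ((n : Int) + 1) (gI (n : Int) + 1) = f (n + 1) := by
  rcases Nat.lt_or_ge n 6 with h6 | h6
  · -- n = 3, 4, 5: closed computations
    interval_cases n
    · show cleanFold 4 (gI 3 + 1) = f 4
      norm_num [cleanFold, gI, f_val_4]
      decide
    · show cleanFold 5 (gI 4 + 1) = f 5
      norm_num [cleanFold, gI, f_val_4, f_val_5]
      decide
    · show cleanFold 6 (gI 5 + 1) = f 6
      norm_num [cleanFold, gI, f_val_5, f_val_6]
      decide
  · -- n ≥ 6: all four guards hold; this is the window fold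
    have h4 : 4 ≤ n + 1 := by omega
    rw [f_rec (n + 1) h4, full_eq_wfold (n + 1) h4]
    unfold wfold
    have hlo : max 1 (n + 1 - 6) = n - 5 := by omega
    rw [hlo, show n + 1 - 2 - (n - 5) = 4 by omega]
    have hrange : List.range' (n - 5) 4 = [n - 5, n - 4, n - 3, n - 2] := by
      simp [List.range']
      omega
    rw [hrange]
    simp only [List.foldl_cons, List.foldl_nil]
    unfold cleanFold
    simp only [List.foldl_cons, List.foldl_nil]
    rw [if_pos (by omega : (1:Int) ≤ (n : Int) + 1 - 7 + 1),
        if_pos (by omega : (1:Int) ≤ (n : Int) + 1 - 7 + 2),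
        if_pos (by omega : (1:Int) ≤ (n : Int) + 1 - 7 + 3),
        if_pos (by omega : (1:Int) ≤ (n : Int) + 1 - 7 + 4)]
    rw [show (n : Int) + 1 - 7 + 1 = ((n - 5 : Nat) : Int) by omega,
        show (n : Int) + 1 - 7 + 2 = ((n - 4 : Nat) : Int) by omega,
        show (n : Int) + 1 - 7 + 3 = ((n - 3 : Nat) : Int) by omega,
        show (n : Int) + 1 - 7 + 4 = ((n - 2 : Nat) : Int) by omega]
    rw [gI_natCast, gI_natCast, gI_natCast, gI_natCast, gI_natCast]
    rw [show n + 1 - 1 = n by omega]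
    rw [show (1 : Int) + f n = f n + 1 by ring]
    rw [show ((n + 1 : Nat) : Int) = (n : Int) + 1 by push_cast; ring]

theorem loopB (n : Nat) (h : 3 ≤ n) :
    (PySem.List.pyRange 4 ((n : Int) + 1) 1).foldl
      (fun win i =>
        let best := PySem.List.pyGetD win 6 0 + 1
        let best := (PySem.List.pyRange 1 5 1).foldl
          (fun best k =>
            let j := i - 7 + k
            if 1 ≤ j then max best (PySem.List.pyGetD win k 0 * (i - j - 1)) else best) best
        PySem.List.slice win (some 1) none ++ [best]) [0, 0, 0, 0, 1, 2, 3]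
    = [gI ((n : Int) - 6), gI ((n : Int) - 5), gI ((n : Int) - 4), gI ((n : Int) - 3),
       gI ((n : Int) - 2), gI ((n : Int) - 1), gI ((n : Int))] := by
  induction n, h using Nat.le_induction with
  | base =>
    rw [show ((3 : Nat) : Int) + 1 = 4 by norm_num, PySem.List.pyRange_one_eq_nil le_rfl]
    norm_num [gI]
    refine ⟨rfl, rfl, rfl, rfl⟩
  | succ n hn ih =>
    have hc : ((n + 1 : Nat) : Int) + 1 = ((n : Int) + 1) + 1 := by push_cast; ring
    rw [hc, PySem.List.pyRange_one_succ_right (by exact_mod_cast by omega : (4:Int) ≤ (n : Int) + 1),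
        List.foldl_append, ih, List.foldl_cons, List.foldl_nil]
    have hrg : PySem.List.pyRange 1 5 1 = [1, 2, 3, 4] := by
      rw [PySem.List.pyRange_one_cons (by norm_num), PySem.List.pyRange_one_cons (by norm_num),
          PySem.List.pyRange_one_cons (by norm_num), PySem.List.pyRange_one_cons (by norm_num),
          PySem.List.pyRange_one_eq_nil (by norm_num)]
      norm_num
    rw [hrg]
    simp only [PySem.List.pyGetD_ofNat', List.getD_cons_zero, List.getD_cons_succ,
      PySem.List.slice_from_one, List.tail_cons]
    have key : ∀ b : Int, ([1, 2, 3, 4] : List Int).foldl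
        (fun best k => if 1 ≤ (n : Int) + 1 - 7 + k then
          max best (PySem.List.pyGetD [gI ((n : Int) - 6), gI ((n : Int) - 5), gI ((n : Int) - 4),
            gI ((n : Int) - 3), gI ((n : Int) - 2), gI ((n : Int) - 1), gI ((n : Int))] k 0 *
            ((n : Int) + 1 - ((n : Int) + 1 - 7 + k) - 1)) else best) b
        = cleanFold ((n : Int) + 1) b := by
      intro b
      unfold cleanFold
      apply foldl_congr_mem'
      intro acc k hk
      fin_cases hk <;>
        simp only [PySem.List.pyGetD_ofNat', List.getD_cons_zero, List.getD_cons_succ] <;>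
        ring_nf
    rw [key, cleanFold_eq n hn]
    push_cast
    simp only [List.cons_append, List.nil_append, List.cons.injEq]
    refine ⟨by congr 1; ring, by congr 1; ring, by congr 1; ring, by congr 1; ring,
      by congr 1; ring, by congr 1; ring, ?_, trivial⟩
    rw [show (n : Int) + 1 = ((n + 1 : Nat) : Int) by push_cast; ring, gI_natCast]

theorem maxA_alt_eq (n : Nat) (h : 4 ≤ n) : maxA_alt ((n : Int)) = f n := by
  simp only [maxA_alt]
  rw [if_neg (by exact_mod_cast by omega : ¬ ((n : Int) ≤ 0)),
      if_neg (by exact_mod_cast by omega : ¬ ((n : Int) < 4))]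
  rw [loopB n (by omega)]
  rw [show (6:Int) = ((6:Nat):Int) by norm_num, PySem.List.pyGetD_natCast]
  show gI ((n : Int)) = f n
  exact gI_natCast n

-- ===== VERDICT (by name: the statement is the Claim_ definition above) =====
theorem maxA_spec : Claim_unchanged_maxA := by
  intro N _ hpre hnd
  by_cases h4 : 4 ≤ N
  · have hN : N = ((N.toNat : Nat) : Int) := (Int.toNat_of_nonneg (by omega)).symm
    rw [hN, maxA_eq N.toNat (by omega), maxA_alt_eq N.toNat (by omega)]
  · unfold Pre_maxA at hpre
    unfold D_maxA at hnd
    interval_cases N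
    · simp only [maxA, maxA_alt]
      rw [PySem.List.pyRange_one_eq_nil (by norm_num)]
      simp only [List.foldl_nil]
      rw [PySem.List.pyGetD_neg_ofNat _ 4 _ (by norm_num) (by norm_num)]
      norm_num
    · exact absurd (Or.inl rfl) hnd
    · exact absurd (Or.inr (Or.inl rfl)) hnd
    · exact absurd (Or.inr (Or.inr rfl)) hnd
    all_goals
      simp only [maxA, maxA_alt]
      rw [PySem.List.pyRange_one_eq_nil (by norm_num)]
      simp only [List.foldl_nil]
      rw [PySem.List.pyGetD_ofNat']
      norm_num

theorem maxA_changed : Claim_changed_maxA := by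
  unfold Claim_changed_maxA
  refine ⟨by decide, by decide, by decide, ?_, ?_, by decide⟩
  · show maxA (-1) = 3
    simp [maxA]
    rw [PySem.List.pyGetD_neg_ofNat _ 1 _ (by omega) (by simp)]
    simp
  · show maxA_alt (-1) = 0
    norm_num [maxA_alt]

theorem maxA_tight : Claim_exact_maxA := by
  intro N _ _ hd
  have hb : -3 ≤ N ∧ N ≤ -1 := by rcases hd with h | h | h <;> omega
  obtain ⟨h1, h2⟩ := hb
  interval_cases N
  · simp only [maxA, maxA_alt]
    rw [PySem.List.pyRange_one_eq_nil (by norm_num)]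
    simp only [List.foldl_nil]
    rw [PySem.List.pyGetD_neg_ofNat _ 3 _ (by norm_num) (by norm_num)]
    norm_num
  · simp only [maxA, maxA_alt]
    rw [PySem.List.pyRange_one_eq_nil (by norm_num)]
    simp only [List.foldl_nil]
    rw [PySem.List.pyGetD_neg_ofNat _ 2 _ (by norm_num) (by norm_num)]
    norm_num
  · simp only [maxA, maxA_alt]
    rw [PySem.List.pyRange_one_eq_nil (by norm_num)]
    simp only [List.foldl_nil]
    rw [PySem.List.pyGetD_neg_ofNat _ 1 _ (by norm_num) (by norm_num)]
    norm_num
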